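-- pv_equiv track=rewrite | github.com/gtsofa/codewars | are_the_numbers_inorder.py | in_asc_order
-- ===== SOURCE A (Python) =====
-- def in_asc_order(mylist):
--   a = []
--   for i in range(len(mylist)):
--     for j in range(i+1, len(mylist)):
--       if mylist[i] < mylist[j]:
--         # use the a=[] to add True/False depending on the condition such a = [False,True,True,False] values
--         a.append(True)
--       else:
--         a.append(False)
--   #bool =  [i, j for (mylist[i], mylist[j]) if mylist[i] <]
--   # check to see if there is False/True value in a and return False/True accordingly.
--   if False in a:
--     return False
--   return True
-- ===== SOURCE B (Python) =====
-- def in_asc_order(mylist):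
--     # Single pass: strict ascent of adjacent pairs implies all pairs by transitivity.
--     return all(x < y for x, y in zip(mylist, mylist[1:]))
-- ===== Notes on version B (the rewrite author's own statement) =====
-- stated objective: faster
-- what changed: Replaced the quadratic all-pairs comparison list with a single pass over adjacent pairs (zip), relying on transitivity of <.
import Mathlib
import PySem

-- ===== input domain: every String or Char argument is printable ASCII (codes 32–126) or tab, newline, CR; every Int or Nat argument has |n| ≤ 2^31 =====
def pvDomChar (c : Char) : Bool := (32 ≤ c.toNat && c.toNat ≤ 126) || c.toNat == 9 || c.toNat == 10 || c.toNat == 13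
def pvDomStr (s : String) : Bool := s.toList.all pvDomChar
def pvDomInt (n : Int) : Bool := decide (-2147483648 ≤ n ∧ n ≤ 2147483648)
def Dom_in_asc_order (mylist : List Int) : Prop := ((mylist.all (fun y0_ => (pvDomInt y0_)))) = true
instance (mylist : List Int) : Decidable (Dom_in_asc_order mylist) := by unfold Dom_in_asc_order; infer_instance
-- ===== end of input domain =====

-- B replaces A's quadratic all-pairs comparison with a single adjacent-pair pass (asymptotically faster).


-- ===== PORT A =====
def in_asc_order (mylist : List Int) : Bool :=
  let a : List Bool :=
    (PySem.List.pyRange 0 (mylist.length : Int) 1).foldl (fun a i =>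
      (PySem.List.pyRange (i + 1) (mylist.length : Int) 1).foldl (fun a j =>
        if PySem.List.pyGetD mylist i 0 < PySem.List.pyGetD mylist j 0 then
          a ++ [true]
        else
          a ++ [false]) a) []
  if false ∈ a then false else true

-- ===== PORT B =====
def in_asc_order_alt (mylist : List Int) : Bool :=
  (mylist.zip mylist.tail).all (fun p => decide (p.1 < p.2))

-- ===== PRECONDITION & SPEC =====
def Spec_in_asc_order (mylist : List Int) (out : Bool) : Prop := out = in_asc_order_alt mylist
instance (mylist : List Int) (out : Bool) : Decidable (Spec_in_asc_order mylist out) := by unfold Spec_in_asc_order; infer_instance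

-- ===== CLAIM (what is proved, stated in full; the proofs are below) =====
def Claim_equal_in_asc_order : Prop := ∀ (mylist : List Int), Dom_in_asc_order mylist → Spec_in_asc_order mylist (in_asc_order mylist)

-- ===== LEMMAS AND PROOFS =====

theorem in_asc_order_alt_iff (m : List Int) :
    in_asc_order_alt m = true ↔ List.IsChain (· < ·) m := by
  induction m with
  | nil => simp [in_asc_order_alt]
  | cons x t ih =>
    cases t with
    | nil => simp [in_asc_order_alt]
    | cons y t' =>
      simp only [in_asc_order_alt, List.tail_cons, List.zip_cons_cons, List.all_cons,
        Bool.and_eq_true, decide_eq_true_eq, List.isChain_cons_cons] at ih ⊢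
      exact and_congr Iff.rfl ih

theorem in_asc_order_iff (m : List Int) :
    in_asc_order m = true ↔ List.Pairwise (· < ·) m := by
  have hf : ∀ i : Int,
      (fun (a : List Bool) (j : Int) =>
          if PySem.List.pyGetD m i 0 < PySem.List.pyGetD m j 0 then a ++ [true] else a ++ [false])
        = fun a j => a ++ [decide (PySem.List.pyGetD m i 0 < PySem.List.pyGetD m j 0)] := by
    intro i; funext a j; split_ifs with h <;> simp [h]
  have houter :
      (PySem.List.pyRange 0 (m.length : Int) 1).foldl (fun a i =>
        (PySem.List.pyRange (i + 1) (m.length : Int) 1).foldl (fun a j =>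
          if PySem.List.pyGetD m i 0 < PySem.List.pyGetD m j 0 then a ++ [true] else a ++ [false]) a)
        ([] : List Bool)
      = (PySem.List.pyRange 0 (m.length : Int) 1).flatMap (fun i =>
          (PySem.List.pyRange (i + 1) (m.length : Int) 1).map
            (fun j => decide (PySem.List.pyGetD m i 0 < PySem.List.pyGetD m j 0))) := by
    have hb : (fun (a : List Bool) (i : Int) =>
        (PySem.List.pyRange (i + 1) (m.length : Int) 1).foldl (fun a j =>
          if PySem.List.pyGetD m i 0 < PySem.List.pyGetD m j 0 then a ++ [true] else a ++ [false]) a)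
        = fun a i => a ++ (PySem.List.pyRange (i + 1) (m.length : Int) 1).map
            (fun j => decide (PySem.List.pyGetD m i 0 < PySem.List.pyGetD m j 0)) := by
      funext a i
      rw [hf i, PySem.List.foldl_append_singleton_eq_map]
    rw [hb, PySem.List.foldl_append_eq_flatMap]
    simp
  unfold in_asc_order
  rw [houter]
  have hmem : (false ∈ (PySem.List.pyRange 0 (m.length : Int) 1).flatMap (fun i =>
      (PySem.List.pyRange (i + 1) (m.length : Int) 1).map
        (fun j => decide (PySem.List.pyGetD m i 0 < PySem.List.pyGetD m j 0))))
      ↔ ∃ i : Int, (0 ≤ i ∧ i < (m.length : Int)) ∧ ∃ j : Int,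
          (i + 1 ≤ j ∧ j < (m.length : Int)) ∧ ¬ PySem.List.pyGetD m i 0 < PySem.List.pyGetD m j 0 := by
    simp [List.mem_flatMap, List.mem_map, PySem.List.mem_pyRange_one, eq_comm]
  rw [List.pairwise_iff_getElem]
  by_cases h : (false ∈ (PySem.List.pyRange 0 (m.length : Int) 1).flatMap (fun i =>
      (PySem.List.pyRange (i + 1) (m.length : Int) 1).map
        (fun j => decide (PySem.List.pyGetD m i 0 < PySem.List.pyGetD m j 0))))
  · rw [if_pos h]
    simp only [Bool.false_eq_true, false_iff]
    obtain ⟨i, ⟨hi0, hin⟩, j, ⟨hij, hjn⟩, hnlt⟩ := hmem.mp h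
    intro hall
    apply hnlt
    have hgi : PySem.List.pyGetD m i 0 = m[i.toNat]'(by omega) :=
      PySem.List.pyGetD_eq_getElem m 0 hi0 hin
    have hgj : PySem.List.pyGetD m j 0 = m[j.toNat]'(by omega) :=
      PySem.List.pyGetD_eq_getElem m 0 (by omega) hjn
    rw [hgi, hgj]
    exact hall i.toNat j.toNat (by omega) (by omega) (by omega)
  · rw [if_neg h]
    simp only [true_iff]
    intro i j hi hj hij
    by_contra hnlt
    apply h
    refine hmem.mpr ⟨(i : Int), ⟨by omega, by omega⟩, (j : Int), ⟨by omega, by omega⟩, ?_⟩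
    have h1 : PySem.List.pyGetD m ((i : Nat) : Int) 0 = m[i]'hi := by
      rw [PySem.List.pyGetD_eq_getElem m 0 (by omega) (by omega)]
      simp
    have h2 : PySem.List.pyGetD m ((j : Nat) : Int) 0 = m[j]'hj := by
      rw [PySem.List.pyGetD_eq_getElem m 0 (by omega) (by omega)]
      simp
    rw [h1, h2]
    simpa using hnlt

-- ===== VERDICT (by name: the statement is the Claim_ definition above) =====
theorem in_asc_order_spec : Claim_equal_in_asc_order := by
  intro m _
  unfold Spec_in_asc_order
  have h := (in_asc_order_iff m).trans
    ((List.isChain_iff_pairwise (R := (· < · : Int → Int → Prop))).symm.trans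
      (in_asc_order_alt_iff m).symm)
  cases hA : in_asc_order m <;> cases hB : in_asc_order_alt m <;> simp_all
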